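-- pv_equiv track=rewrite | github.com/consul-k/Stepik | Python programming basics/step03/3.02/3.2.06.py | pyramid_numbers
-- ===== SOURCE A (Python) =====
-- def pyramid_numbers(n):
--     numbers = []
--     k = 1
--     while True:
--         pyramid_num = k * (k + 1) * (2*k + 1) // 6
--         if pyramid_num >= n:
--             break
--         numbers.append(pyramid_num)
--         k += 1
--     return numbers
-- ===== SOURCE B (Python) =====
-- def pyramid_numbers(n):
--     def gen():
--         total = 0
--         k = 1
--         while total + k * k < n:
--             total += k * k
--             yield total
--             k += 1
--     return list(gen())
-- ===== Notes on version B (the rewrite author's own statement) =====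
-- stated objective: alternative
-- what changed: B is a generator that yields a running cumulative sum of squares (total += k*k) with the bound tested in the loop condition, instead of A's while-True/break loop that appends the closed-form value k(k+1)(2k+1)//6 to an accumulator list.
import Mathlib
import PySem

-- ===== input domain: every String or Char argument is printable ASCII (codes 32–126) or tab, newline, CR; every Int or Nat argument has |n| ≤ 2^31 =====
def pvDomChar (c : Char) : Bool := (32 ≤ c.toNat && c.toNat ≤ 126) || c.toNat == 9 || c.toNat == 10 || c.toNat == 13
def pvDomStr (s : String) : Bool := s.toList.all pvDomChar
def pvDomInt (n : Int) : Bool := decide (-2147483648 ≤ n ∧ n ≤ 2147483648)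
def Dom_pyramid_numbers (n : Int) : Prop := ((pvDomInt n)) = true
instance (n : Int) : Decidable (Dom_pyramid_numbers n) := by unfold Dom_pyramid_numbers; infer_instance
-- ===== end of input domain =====

-- B restructures A as a generator yielding a running sum of squares (bound in the loop condition, cons-built output) instead of A's while-True/break append loop with the closed-form k(k+1)(2k+1)//6; alternative decomposition, same cost.


-- ===== PORT A =====
-- A's 'while True' loop with break and list append; the pyramid number k(k+1)(2k+1) // 6
-- reaches n once k ≥ max(n,1), so fuel n.toNat + 1 is a pure totality guard: the loop
-- always breaks before the fuel runs out.
def pyLoopA : Nat → Int → Int → List Int → List Int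
  | 0, _, _, numbers => numbers
  | fuel + 1, n, k, numbers =>
    let pyramid_num := PySem.Int.floordiv (k * (k + 1) * (2*k + 1)) 6
    if pyramid_num ≥ n then numbers
    else pyLoopA fuel n (k + 1) (numbers ++ [pyramid_num])

def pyramid_numbers (n : Int) : List Int := pyLoopA (n.toNat + 1) n 1 []

-- ===== PORT B =====
-- B's generator: each yielded value becomes a cons; the while condition 'total + k*k < n'
-- guards the step. Same pure totality guard (fuel n.toNat + 1).
def pyGenB : Nat → Int → Int → Int → List Int
  | 0, _, _, _ => []
  | fuel + 1, n, total, k =>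
    if total + k * k < n then (total + k * k) :: pyGenB fuel n (total + k * k) (k + 1)
    else []

def pyramid_numbers_alt (n : Int) : List Int := pyGenB (n.toNat + 1) n 0 1

-- ===== PRECONDITION & SPEC =====
def Spec_pyramid_numbers (n : Int) (out : List Int) : Prop := out = pyramid_numbers_alt n
instance (n : Int) (out : List Int) : Decidable (Spec_pyramid_numbers n out) := by unfold Spec_pyramid_numbers; infer_instance

-- ===== CLAIM (what is proved, stated in full; the proofs are below) =====
def Claim_equal_pyramid_numbers : Prop := ∀ (n : Int), Dom_pyramid_numbers n → Spec_pyramid_numbers n (pyramid_numbers n)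

-- ===== LEMMAS AND PROOFS =====

-- 6 divides k(k+1)(2k+1) exactly, so A's floor division returns the exact quotient t when 6*t = k(k+1)(2k+1)
theorem floordiv_six_exact (t : Int) : PySem.Int.floordiv (6 * t) 6 = t := by
  rw [PySem.Int.floordiv_eq_ediv_of_pos (by norm_num)]
  exact Int.mul_ediv_cancel_left t (by norm_num)

-- loop invariant: when 6*total = (k-1)*k*(2k-1) (6 × the sum of squares up to k-1), A's
-- accumulator loop equals its accumulator followed by B's generated tail, fuel in lockstep
theorem loop_eq (fuel : Nat) : ∀ (n k total : Int) (numbers : List Int),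
    6 * total = (k - 1) * k * (2*k - 1) →
    pyLoopA fuel n k numbers = numbers ++ pyGenB fuel n total k := by
  induction fuel with
  | zero => intro n k total numbers _; simp [pyLoopA, pyGenB]
  | succ fuel ih =>
    intro n k total numbers hinv
    have hval : k * (k + 1) * (2*k + 1) = 6 * (total + k * k) := by nlinarith
    have hpn : PySem.Int.floordiv (k * (k + 1) * (2*k + 1)) 6 = total + k * k := by
      rw [hval, floordiv_six_exact]
    show (let pyramid_num := PySem.Int.floordiv (k * (k + 1) * (2*k + 1)) 6;
          if pyramid_num ≥ n then numbers
          else pyLoopA fuel n (k + 1) (numbers ++ [pyramid_num])) = _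
    simp only [pyGenB, hpn]
    by_cases h : total + k * k < n
    · rw [if_neg (not_le.mpr h), if_pos h,
        ih n (k + 1) (total + k * k) _ (by ring_nf; ring_nf at hinv; linarith)]
      simp
    · rw [if_pos (not_lt.mp h), if_neg h, List.append_nil]

-- ===== VERDICT (by name: the statement is the Claim_ definition above) =====
theorem pyramid_numbers_spec : Claim_equal_pyramid_numbers := by
  intro n _
  unfold Spec_pyramid_numbers pyramid_numbers pyramid_numbers_alt
  simpa using loop_eq (n.toNat + 1) n 1 0 [] (by ring)
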